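-- pv_equiv track=rewrite | github.com/mariazverina/aoc2024 | .venv/day17.py | unfuck
-- ===== SOURCE A (Python) =====
-- def fn(k):
--     foo = (k & 7) ^ 5
--     bar = (k >> foo) ^ 6
--     v = (foo ^ bar) & 7
--     k = k >> 3
--     return k, v
--
-- def unfuck(k, pp):
--     if len(pp) == 0:
--         return k
--     target = pp[-1]
--     k *= 8
--     for i in range(8):
--         _, val = fn( k + i )
--         if val == target:
--             r = unfuck( k + i, pp[:-1])
--             if r is not None:
--                 return r
--
--     return None
-- ===== SOURCE B (Python) =====
-- def fn(k):
--     foo = (k & 7) ^ 5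
--     bar = (k >> foo) ^ 6
--     v = (foo ^ bar) & 7
--     k = k >> 3
--     return k, v
--
-- def unfuck(k, pp):
--     # Iterative DFS with an explicit stack of (value, remaining-digit-count)
--     # states; children are pushed in reverse (i = 7 .. 0) so the smallest i
--     # is explored first, matching the recursive search order.
--     stack = [(k, len(pp))]
--     while stack:
--         k, r = stack.pop()
--         if r == 0:
--             return k
--         target = pp[r - 1]
--         base = k * 8
--         for i in range(7, -1, -1):
--             _, val = fn(base + i)
--             if val == target:
--                 stack.append((base + i, r - 1))
--     return None
-- ===== Notes on version B (the rewrite author's own statement) =====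
-- stated objective: alternative
-- what changed: Replaced A's recursive backtracking (recursing on pp[:-1] with an early-return loop) by an iterative DFS over an explicit stack of (value, remaining-digit-count) states that indexes the fixed list pp instead of slicing it, pushing matching children in reverse so the first solution found is the same.
import Mathlib
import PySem

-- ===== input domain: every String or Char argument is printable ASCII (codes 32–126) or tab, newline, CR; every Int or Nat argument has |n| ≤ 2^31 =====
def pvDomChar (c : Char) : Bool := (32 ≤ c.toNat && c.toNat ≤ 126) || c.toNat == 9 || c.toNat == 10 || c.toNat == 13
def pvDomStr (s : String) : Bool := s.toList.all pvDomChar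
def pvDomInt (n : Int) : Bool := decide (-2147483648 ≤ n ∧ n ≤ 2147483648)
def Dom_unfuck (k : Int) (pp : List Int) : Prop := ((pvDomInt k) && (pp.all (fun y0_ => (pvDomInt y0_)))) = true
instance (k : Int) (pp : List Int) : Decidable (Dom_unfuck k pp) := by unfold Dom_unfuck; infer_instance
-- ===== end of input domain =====

-- B replaces A's recursion by an explicit-stack iterative DFS over (value, remaining-digits)
-- states (children pushed in reverse so the search order is identical); objective: alternative.

-- ===== PORT A =====
-- fn(k): bitwise ops via PySem (Python-exact on negatives); the shift amount
-- foo = (k & 7) ^ 5 is always in [0,7], so `.toNat` is exact there.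
def fnP (k : Int) : Int × Int :=
  let foo := PySem.Int.bxor (PySem.Int.band k 7) 5
  let bar := PySem.Int.bxor (k >>> foo.toNat) 6
  let v := PySem.Int.band (PySem.Int.bxor foo bar) 7
  (k >>> (3 : Nat), v)

-- pp[:-1] = List.dropLast (exact for every list); pp[-1] via pyGetD (pp ≠ [] here,
-- so the default is never used).  The `for i in range(8)` loop with early return is
-- the helper `unfuckFor` (the extra hypothesis pp ≠ [] only serves termination).
mutual
def unfuck (k : Int) (pp : List Int) : Option Int :=
  if h : pp = [] then some k
  else unfuckFor (k * 8) (PySem.List.pyGetD pp (-1) 0) pp h 0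
termination_by (pp.length, 9)
decreasing_by exact Prod.Lex.right _ (by omega)

def unfuckFor (k8 target : Int) (pp : List Int) (h0 : ¬ pp = []) (i : Int) : Option Int :=
  if hi : i < 8 then
    if (fnP (k8 + i)).2 = target then
      match unfuck (k8 + i) pp.dropLast with
      | some r => some r
      | none => unfuckFor k8 target pp h0 (i + 1)
    else unfuckFor k8 target pp h0 (i + 1)
  else none
termination_by (pp.length, (8 - i).toNat)
decreasing_by
  · exact Prod.Lex.left _ _ (by rw [List.length_dropLast]; exact Nat.sub_lt (Nat.pos_of_ne_zero (by simpa using h0)) one_pos)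
  · exact Prod.Lex.right _ (by omega)
  · exact Prod.Lex.right _ (by omega)
end

-- ===== PORT B =====
-- lemma needed by dfsB's termination proof (cited there by name)
theorem pvFoldPushSumLe {α : Type} (w : α → Nat) (c : Nat) (f : Int → α) (p : Int → Prop)
    [DecidablePred p] (hw : ∀ i, w (f i) ≤ c) :
    ∀ (l : List Int) (rest : List α),
      ((l.foldl (fun st i => if p i then f i :: st else st) rest).map w).sum
        ≤ l.length * c + ((rest.map w).sum) := by
  intro l
  induction l with
  | nil => intro rest; simp
  | cons a l ih =>
    intro rest
    simp only [List.foldl_cons]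
    calc ((l.foldl (fun st i => if p i then f i :: st else st)
            (if p a then f a :: rest else rest)).map w).sum
        ≤ l.length * c + (((if p a then f a :: rest else rest).map w).sum) := ih _
      _ ≤ (a :: l).length * c + ((rest.map w).sum) := by
          have := hw a
          split <;> simp [List.length_cons] <;> nlinarith

-- explicit-stack DFS; stack top = list head; pp[r-1] (Python) = pp.getD r 0 here
-- (index always in range on the stacks unfuck_alt builds, so the default is never used).
def dfsB (pp : List Int) (stack : List (Int × Nat)) : Option Int :=
  match stack with
  | [] => none
  | (k, 0) :: _ => some k
  | (k, Nat.succ r) :: rest =>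
      let target := pp.getD r 0
      let base := k * 8
      dfsB pp ((PySem.List.pyRange 7 (-1) (-1)).foldl
        (fun st i => if (fnP (base + i)).2 = target then (base + i, r) :: st else st) rest)
termination_by (stack.map (fun e => 9 ^ e.2)).sum
decreasing_by
  simp only [dite_eq_ite]
  have h := pvFoldPushSumLe (fun e : Int × Nat => 9 ^ e.2) (9 ^ r)
      (fun i => (k * 8 + i, r)) (fun i => (fnP (k * 8 + i)).2 = pp.getD r 0)
      (fun _ => le_refl _) (PySem.List.pyRange 7 (-1) (-1)) rest
  have hlen : (PySem.List.pyRange 7 (-1) (-1)).length = 8 := by decide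
  simp only [hlen] at h
  have h9 : 0 < 9 ^ r := by positivity
  simp only [List.map_cons, List.sum_cons, pow_succ]
  omega

def unfuck_alt (k : Int) (pp : List Int) : Option Int := dfsB pp [(k, pp.length)]

-- ===== PRECONDITION & SPEC =====
def Spec_unfuck (k : Int) (pp : List Int) (out : Option Int) : Prop := out = unfuck_alt k pp
instance (k : Int) (pp : List Int) (out : Option Int) : Decidable (Spec_unfuck k pp out) := by unfold Spec_unfuck; infer_instance

-- ===== CLAIM (what is proved, stated in full; the proofs are below) =====
def Claim_equal_unfuck : Prop := ∀ (k : Int) (pp : List Int), Dom_unfuck k pp → Spec_unfuck k pp (unfuck k pp)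

-- ===== LEMMAS AND PROOFS =====

-- reference chain: the i-loop of A as a first-success scan over an explicit list of candidates
def pvScan (k8 target : Int) (q : List Int) : List Int → Option Int
  | [] => none
  | i :: is =>
      if (fnP (k8 + i)).2 = target then
        match unfuck (k8 + i) q with
        | some x => some x
        | none => pvScan k8 target q is
      else pvScan k8 target q is

theorem pvFoldPushEq {α : Type} (f : Int → α) (p : Int → Prop) [DecidablePred p] :
    ∀ (l : List Int) (rest : List α),
      l.foldl (fun st i => if p i then f i :: st else st) rest
        = ((l.reverse.filter (fun i => decide (p i))).map f) ++ rest := by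
  intro l
  induction l with
  | nil => simp
  | cons a l ih =>
    intro rest
    simp only [List.foldl_cons, List.reverse_cons, List.filter_append, List.map_append,
      List.append_assoc]
    rw [ih]
    by_cases hp : p a <;> simp [hp]

theorem pvForEqScan (k8 target : Int) (pp : List Int) (h0 : ¬ pp = []) :
    ∀ (n : Nat) (i : Int), i = 8 - (n : Int) → n ≤ 8 →
      unfuckFor k8 target pp h0 i = pvScan k8 target pp.dropLast (PySem.List.pyRange i 8 1) := by
  intro n
  induction n with
  | zero =>
    intro i hi _
    subst hi
    rw [unfuckFor]
    norm_num [pvScan, PySem.List.pyRange_zero]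
  | succ m ih =>
    intro i hi hn
    have hlt : i < 8 := by omega
    rw [PySem.List.pyRange_one_cons hlt, unfuckFor, dif_pos hlt]
    have := ih (i + 1) (by omega) (by omega)
    simp only [pvScan, this]

theorem pvUnfuckNe (k : Int) (pp : List Int) (h : ¬ pp = []) :
    unfuck k pp = pvScan (k * 8) (PySem.List.pyGetD pp (-1) 0) pp.dropLast
      (PySem.List.pyRange 0 8 1) := by
  rw [unfuck, dif_neg h]
  exact pvForEqScan _ _ _ h 8 0 (by norm_num) (by norm_num)

theorem pvMain (pp : List Int) :
    ∀ (r : Nat), r ≤ pp.length → ∀ (k : Int) (s : List (Int × Nat)),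
      dfsB pp ((k, r) :: s)
        = match unfuck k (pp.take r) with
          | some x => some x
          | none => dfsB pp s := by
  intro r
  induction r with
  | zero =>
    intro _ k s
    rw [dfsB, unfuck]
    simp
  | succ r ih =>
    intro hr k s
    have hlt : r < pp.length := by omega
    -- target agreement
    have hlen' : (pp.take (r + 1)).length = r + 1 := by
      simp [List.length_take]; omega
    have hne : ¬ pp.take (r + 1) = [] := by
      intro h; rw [h] at hlen'; simp at hlen'
    have hdrop : (pp.take (r + 1)).dropLast = pp.take r := by
      rw [List.dropLast_eq_take, hlen', List.take_take]
      simp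
    have htarget : PySem.List.pyGetD (pp.take (r + 1)) (-1) 0 = pp.getD r 0 := by
      rw [PySem.List.pyGetD_neg_one _ _ hne, List.getLast_eq_getElem,
        List.getD_eq_getElem _ _ hlt]
      simp [hlen', List.getElem_take]
    -- unfold B one step and normalise the pushed children to a prepended list
    rw [dfsB]
    rw [pvFoldPushEq (fun i => (k * 8 + i, r))
      (fun i => (fnP (k * 8 + i)).2 = pp.getD r 0) (PySem.List.pyRange 7 (-1) (-1)) s]
    have hrev : (PySem.List.pyRange 7 (-1) (-1)).reverse = PySem.List.pyRange 0 8 1 := by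
      decide
    rw [hrev]
    -- unfold A one step into the scan form
    rw [pvUnfuckNe k _ hne, htarget, hdrop]
    -- inner induction over the candidate list
    have C : ∀ (is : List Int) (s : List (Int × Nat)),
        dfsB pp (((is.filter
            (fun i => decide ((fnP (k * 8 + i)).2 = pp.getD r 0))).map
              (fun i => (k * 8 + i, r))) ++ s)
          = match pvScan (k * 8) (pp.getD r 0) (pp.take r) is with
            | some x => some x
            | none => dfsB pp s := by
      intro is
      induction is with
      | nil => intro s; simp [pvScan]
      | cons i is ihc =>
        intro s
        by_cases hp : (fnP (k * 8 + i)).2 = pp.getD r 0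
        · rw [List.filter_cons_of_pos (by simpa using hp), List.map_cons, List.cons_append,
            ih (by omega) (k * 8 + i)]
          simp only [pvScan, if_pos hp]
          cases h : unfuck (k * 8 + i) (pp.take r) with
          | some x => simp
          | none => simp only [ihc s]
        · rw [List.filter_cons_of_neg (by simpa using hp)]
          simp only [pvScan, if_neg hp]
          exact ihc s
    exact C _ s

theorem unfuck_spec : Claim_equal_unfuck := by
  intro k pp _
  unfold Spec_unfuck unfuck_alt
  rw [pvMain pp pp.length (le_refl _) k []]
  rw [List.take_length]
  cases h : unfuck k pp with
  | some x => simp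
  | none => simp [dfsB]
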